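-- pv_equiv track=rewrite | github.com/pypi-data/pypi-mirror-364 | packages/aikitx/aikitx-1.0.0-py3-none-any.whl/llmtoolkit/app/services/chat_service.py | _get_quick_response
-- ===== SOURCE A (Python) =====
-- from typing import List, Optional, Dict, Any
--
-- def _get_quick_response(message: str) -> Optional[str]:
--     """
--     Get a quick response for simple greetings and common phrases.
--
--     Args:
--         message: User message
--
--     Returns:
--         Quick response string or None if no quick response available
--     """
--     message_lower = message.lower().strip()
--
--     # Simple greetings
--     if message_lower in ['hi', 'hello', 'hey', 'good morning', 'good afternoon', 'good evening']:
--         return "Hi there! How can I help you today?"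
--
--     # How are you variations
--     if any(phrase in message_lower for phrase in ['how are you', 'how do you do', 'how\'s it going']):
--         return "I'm doing well, thank you for asking! What can I assist you with?"
--
--     # Thank you variations
--     if any(phrase in message_lower for phrase in ['thank you', 'thanks', 'thx']):
--         return "You're welcome! Is there anything else I can help you with?"
--
--     # Goodbye variations
--     if message_lower in ['bye', 'goodbye', 'see you', 'farewell']:
--         return "Goodbye! Feel free to come back if you need any help."
--
--     # No quick response available
--     return None
-- ===== SOURCE B (Python) =====
-- # B: collect ALL matching candidates (exact via one dict lookup, substrings via one scan),
-- # then pick the highest-precedence one with min(); no early returns, precedence by priority number.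
-- from typing import Optional
--
-- _R0 = "Hi there! How can I help you today?"
-- _R1 = "I'm doing well, thank you for asking! What can I assist you with?"
-- _R2 = "You're welcome! Is there anything else I can help you with?"
-- _R3 = "Goodbye! Feel free to come back if you need any help."
--
-- _EXACT = {
--     'hi': (0, _R0), 'hello': (0, _R0), 'hey': (0, _R0),
--     'good morning': (0, _R0), 'good afternoon': (0, _R0), 'good evening': (0, _R0),
--     'bye': (3, _R3), 'goodbye': (3, _R3), 'see you': (3, _R3), 'farewell': (3, _R3),
-- }
--
-- _SUBSTR = [
--     (1, 'how are you', _R1), (1, 'how do you do', _R1), (1, "how's it going", _R1),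
--     (2, 'thank you', _R2), (2, 'thanks', _R2), (2, 'thx', _R2),
-- ]
--
-- def _get_quick_response(message: str) -> Optional[str]:
--     ml = message.lower().strip()
--     matches = []
--     hit = _EXACT.get(ml)
--     if hit is not None:
--         matches.append(hit)
--     for prio, phrase, resp in _SUBSTR:
--         if phrase in ml:
--             matches.append((prio, resp))
--     if not matches:
--         return None
--     return min(matches, key=lambda t: t[0])[1]
-- ===== Notes on version B (the rewrite author's own statement) =====
-- stated objective: alternative
-- what changed: Instead of four sequential early-return branches, B gathers every matching candidate (one dict lookup for exact phrases, one scan for substring phrases) into a priority-tagged list and returns the minimum-priority candidate's response.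
import Mathlib
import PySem

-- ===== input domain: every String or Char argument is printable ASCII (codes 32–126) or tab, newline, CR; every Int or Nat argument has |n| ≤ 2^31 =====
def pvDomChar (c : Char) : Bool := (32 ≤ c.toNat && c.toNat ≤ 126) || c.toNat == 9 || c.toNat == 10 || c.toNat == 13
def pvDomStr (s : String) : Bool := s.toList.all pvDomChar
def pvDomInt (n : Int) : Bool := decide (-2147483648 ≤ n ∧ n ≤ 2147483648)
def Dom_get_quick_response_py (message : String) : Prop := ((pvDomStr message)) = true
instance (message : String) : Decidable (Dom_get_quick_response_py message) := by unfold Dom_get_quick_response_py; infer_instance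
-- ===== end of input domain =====

-- B gathers all matching candidates (dict lookup for exact phrases, one scan for substring phrases)
-- and returns the minimum-priority one, instead of A's four sequential early-return branches.

-- ===== PORT A =====
def get_quick_response_py (message : String) : Option String :=
  let message_lower := PySem.Str.strip (PySem.Str.lower message)
  if ["hi", "hello", "hey", "good morning", "good afternoon", "good evening"].contains message_lower then
    some "Hi there! How can I help you today?"
  else if (["how are you", "how do you do", "how's it going"].any fun phrase => PySem.Str.isIn phrase message_lower) then
    some "I'm doing well, thank you for asking! What can I assist you with?"
  else if (["thank you", "thanks", "thx"].any fun phrase => PySem.Str.isIn phrase message_lower) then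
    some "You're welcome! Is there anything else I can help you with?"
  else if ["bye", "goodbye", "see you", "farewell"].contains message_lower then
    some "Goodbye! Feel free to come back if you need any help."
  else
    none

-- ===== PORT B =====
-- module-level constants of Source B
def pvR0 : String := "Hi there! How can I help you today?"
def pvR1 : String := "I'm doing well, thank you for asking! What can I assist you with?"
def pvR2 : String := "You're welcome! Is there anything else I can help you with?"
def pvR3 : String := "Goodbye! Feel free to come back if you need any help."

def pvExact : PySem.Dict String (Int × String) :=
  PySem.Dict.ofList
    [ ("hi", (0, pvR0)), ("hello", (0, pvR0)), ("hey", (0, pvR0)),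
      ("good morning", (0, pvR0)), ("good afternoon", (0, pvR0)), ("good evening", (0, pvR0)),
      ("bye", (3, pvR3)), ("goodbye", (3, pvR3)), ("see you", (3, pvR3)), ("farewell", (3, pvR3)) ]

def pvSubstr : List (Int × String × String) :=
  [ (1, "how are you", pvR1), (1, "how do you do", pvR1), (1, "how's it going", pvR1),
    (2, "thank you", pvR2), (2, "thanks", pvR2), (2, "thx", pvR2) ]

def get_quick_response_py_alt (message : String) : Option String :=
  let ml := PySem.Str.strip (PySem.Str.lower message)
  -- cands (Python: matches): start from the optional exact hit, then the for-loop appends substring hits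
  let cands :=
    pvSubstr.foldl
      (fun acc r => if PySem.Str.isIn r.2.1 ml then acc ++ [(r.1, r.2.2)] else acc)
      (match pvExact.get? ml with | some hit => [hit] | none => [])
  -- 'if not matches: return None; return min(matches, key=…)[1]'
  match PySem.List.min? cands (fun t => t.1) with
  | some t => some t.2
  | none => none

-- ===== PRECONDITION & SPEC =====
def Spec_get_quick_response_py (message : String) (out : Option String) : Prop := out = get_quick_response_py_alt message
instance (message : String) (out : Option String) : Decidable (Spec_get_quick_response_py message out) := by unfold Spec_get_quick_response_py; infer_instance

-- ===== CLAIM =====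
def Claim_equal_get_quick_response_py : Prop := ∀ (message : String), Dom_get_quick_response_py message → Spec_get_quick_response_py message (get_quick_response_py message)

-- ===== LEMMAS AND PROOFS =====

-- ===== VERDICT =====
set_option maxHeartbeats 4000000 in
theorem get_quick_response_py_spec : Claim_equal_get_quick_response_py := by
  intro message _
  unfold Spec_get_quick_response_py get_quick_response_py get_quick_response_py_alt
  generalize PySem.Str.strip (PySem.Str.lower message) = ml
  have hx : pvExact = PySem.Dict.mk
    [ ("hi", (0, pvR0)), ("hello", (0, pvR0)), ("hey", (0, pvR0)),
      ("good morning", (0, pvR0)), ("good afternoon", (0, pvR0)), ("good evening", (0, pvR0)),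
      ("bye", (3, pvR3)), ("goodbye", (3, pvR3)), ("see you", (3, pvR3)), ("farewell", (3, pvR3)) ] := by rfl
  rw [hx]
  simp only [pvSubstr, List.foldl, PySem.Dict.get?_mk_cons, List.contains_eq_mem,
    List.mem_cons, List.any_cons, List.any_nil, Bool.or_eq_true,
    decide_eq_true_eq, beq_iff_eq, List.not_mem_nil, or_false]
  by_cases h0 : ml = "hi" ∨ ml = "hello" ∨ ml = "hey" ∨ ml = "good morning" ∨ ml = "good afternoon" ∨ ml = "good evening"
  · rcases h0 with h|h|h|h|h|h <;> subst h <;> rfl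
  · by_cases h4 : ml = "bye" ∨ ml = "goodbye" ∨ ml = "see you" ∨ ml = "farewell"
    · rcases h4 with h|h|h|h <;> subst h <;> rfl
    · rw [if_neg (show ¬("hi" = ml) from fun h => h0 (Or.inl h.symm)),
        if_neg (show ¬("hello" = ml) from fun h => h0 (Or.inr (Or.inl h.symm))),
        if_neg (show ¬("hey" = ml) from fun h => h0 (Or.inr (Or.inr (Or.inl h.symm)))),
        if_neg (show ¬("good morning" = ml) from fun h => h0 (Or.inr (Or.inr (Or.inr (Or.inl h.symm))))),
        if_neg (show ¬("good afternoon" = ml) from fun h => h0 (Or.inr (Or.inr (Or.inr (Or.inr (Or.inl h.symm)))))),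
        if_neg (show ¬("good evening" = ml) from fun h => h0 (Or.inr (Or.inr (Or.inr (Or.inr (Or.inr h.symm)))))),
        if_neg (show ¬("bye" = ml) from fun h => h4 (Or.inl h.symm)),
        if_neg (show ¬("goodbye" = ml) from fun h => h4 (Or.inr (Or.inl h.symm))),
        if_neg (show ¬("see you" = ml) from fun h => h4 (Or.inr (Or.inr (Or.inl h.symm)))),
        if_neg (show ¬("farewell" = ml) from fun h => h4 (Or.inr (Or.inr (Or.inr h.symm)))),
        if_neg h0]
      split_ifs <;> first | rfl | simp_all
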